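-- pv_equiv track=rewrite | github.com/Andrew82106/EasyDataMaker_Docker_allocator | utils/dockerManager.py | dealLine
-- ===== SOURCE A (Python) =====
-- def dealLine(TextIn: str):
--     y = ''
--     flag = False
--     for i in range(1, len(TextIn)-1, 1):
--         if TextIn[i] == " " and TextIn[i-1] != " " and TextIn[i+1] != " ":
--             TextIn = TextIn[:i] + "_" + TextIn[i+1:]
--     for i in TextIn:
--         if i == ' ' and flag:
--             continue
--         if i != ' ' and flag:
--             flag = False
--         y += i
--         if i == ' ':
--             flag = True
--
--     x = y.split(" ")
--     for i in range(len(x)-1, -1, -1):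
--         if len(x[i]) == 0:
--             x.pop(i)
--     return x
-- ===== SOURCE B (Python) =====
-- def dealLine(TextIn: str):
--     n = len(TextIn)
--     tokens = []
--     cur = []
--     for i, c in enumerate(TextIn):
--         if c == ' ':
--             if 0 < i < n - 1 and TextIn[i-1] != ' ' and TextIn[i+1] != ' ':
--                 cur.append('_')
--             elif cur:
--                 tokens.append(''.join(cur))
--                 cur = []
--         else:
--             cur.append(c)
--     if cur:
--         tokens.append(''.join(cur))
--     return tokens
-- ===== Notes on version B (the rewrite author's own statement) =====
-- stated objective: faster
-- what changed: A rebuilds the string by slicing for every isolated space, re-walks it to collapse space runs, splits, then pops empties in a third pass; B makes one linear pass that substitutes isolated spaces (checked against the original string, which is what A's in-place rewrites amount to) and emits tokens directly.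
import Mathlib
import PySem

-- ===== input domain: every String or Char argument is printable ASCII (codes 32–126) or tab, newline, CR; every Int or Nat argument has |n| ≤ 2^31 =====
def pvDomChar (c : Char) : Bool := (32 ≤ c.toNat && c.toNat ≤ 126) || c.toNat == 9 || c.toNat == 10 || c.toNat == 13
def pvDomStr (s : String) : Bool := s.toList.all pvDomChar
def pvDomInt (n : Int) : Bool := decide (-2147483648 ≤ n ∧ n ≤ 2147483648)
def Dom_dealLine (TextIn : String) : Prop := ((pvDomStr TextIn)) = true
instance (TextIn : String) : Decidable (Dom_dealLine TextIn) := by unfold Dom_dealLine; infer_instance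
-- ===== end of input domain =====

-- B replaces A's quadratic rebuild-the-string / collapse / split / pop pipeline by one linear
-- pass that substitutes isolated spaces and emits the tokens directly (objective: faster).

-- ===== PORT A =====
-- first loop: TextIn = TextIn[:i] + "_" + TextIn[i+1:] on isolated spaces

def dealLineSubStep (t : List Char) (i : Int) : List Char :=
  if (PySem.List.pyGet? t i == some ' ') && (PySem.List.pyGet? t (i - 1) != some ' ')
      && (PySem.List.pyGet? t (i + 1) != some ' ') then
    PySem.List.slice t none (some i) ++ '_' :: PySem.List.slice t (some (i + 1)) none
  else t

-- second loop: y += i with the space-collapsing flag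

def dealLineCollapseStep (acc : List Char × Bool) (c : Char) : List Char × Bool :=
  if c == ' ' && acc.2 then acc
  else
    let flag := if c != ' ' && acc.2 then false else acc.2
    let y := acc.1 ++ [c]
    let flag := if c == ' ' then true else flag
    (y, flag)

-- third loop: if len(x[i]) == 0: x.pop(i), i counting down

def dealLinePopStep (x : List (List Char)) (i : Int) : List (List Char) :=
  if (PySem.List.pyGetD x i []).length == 0 then
    match PySem.List.pop? x i with
    | some r => r.2
    | none => x
  else x

def dealLine (TextIn : String) : List String :=
  let s := TextIn.toList
  let s := (PySem.List.pyRange 1 (PySem.List.len s - 1) 1).foldl dealLineSubStep s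
  let y := (s.foldl dealLineCollapseStep ([], false)).1
  let x := PySem.Chars.splitOn y [' ']
  let x := (PySem.List.pyRange (PySem.List.len x - 1) (-1) (-1)).foldl dealLinePopStep x
  x.map String.ofList   -- x = y.split(" ") ported as Chars.splitOn (sep nonempty)


-- ===== PORT B =====

def dealLineAltStep (s : List Char) (n : Int) (acc : List (List Char) × List Char)
    (ic : Int × Char) : List (List Char) × List Char :=
  let toks := acc.1
  let cur := acc.2
  let i := ic.1
  let c := ic.2
  if c == ' ' then
    if (decide (0 < i) && decide (i < n - 1)) && (PySem.List.pyGet? s (i - 1) != some ' ')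
        && (PySem.List.pyGet? s (i + 1) != some ' ') then
      (toks, cur ++ ['_'])
    else if !cur.isEmpty then (toks ++ [cur], [])
    else (toks, cur)
  else (toks, cur ++ [c])

def dealLine_alt (TextIn : String) : List String :=
  let s := TextIn.toList
  let n := PySem.List.len s
  let r := (PySem.List.enumerate s 0).foldl (dealLineAltStep s n) ([], [])
  (if !r.2.isEmpty then r.1 ++ [r.2] else r.1).map String.ofList


-- ===== PRECONDITION & SPEC =====
def Spec_dealLine (TextIn : String) (out : List String) : Prop := out = dealLine_alt TextIn
instance (TextIn : String) (out : List String) : Decidable (Spec_dealLine TextIn out) := by unfold Spec_dealLine; infer_instance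

-- ===== CLAIM (what is proved, stated in full; the proofs are below) =====
def Claim_equal_dealLine : Prop := ∀ (TextIn : String), Dom_dealLine TextIn → Spec_dealLine TextIn (dealLine TextIn)

-- ===== LEMMAS AND PROOFS =====

-- isolated-space test on the ORIGINAL string (Nat indices)

def isoB (s : List Char) (i : Nat) : Bool :=
  (s[i]? == some ' ') && decide (0 < i) && decide (i + 1 < s.length)
    && (s[i-1]? != some ' ') && (s[i+1]? != some ' ')

-- the whole string with every isolated space replaced

def substAll (s : List Char) : List Char :=
  s.mapIdx (fun i c => if isoB s i then '_' else c)

-- only isolated spaces at positions < k replaced (invariant of A's first loop)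

def partialSub (s : List Char) (k : Nat) : List Char :=
  s.mapIdx (fun i c => if decide (i < k) && isoB s i then '_' else c)

-- specification of splitOn.go with sep = " "

def splitSp : List Char → List Char → List (List Char)
  | [], cur => [cur.reverse]
  | c :: r, cur => if c == ' ' then cur.reverse :: splitSp r [] else splitSp r (c :: cur)

-- specification of A's collapsing loop

def collapseR : List Char → Bool → List Char
  | [], _ => []
  | c :: r, flag =>
    if c == ' ' then (if flag then collapseR r true else c :: collapseR r true)
    else c :: collapseR r false

-- the common specification: maximal runs of non-space characters

def wordsSp : List Char → List Char → List (List Char)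
  | [], cur => if cur.isEmpty then [] else [cur]
  | c :: r, cur =>
    if c == ' ' then (if cur.isEmpty then wordsSp r [] else cur :: wordsSp r [])
    else wordsSp r (cur ++ [c])

-- plain flush/append step over the substituted string (what B's step reduces to)

def stepC (acc : List (List Char) × List Char) (c : Char) : List (List Char) × List Char :=
  if c == ' ' then (if acc.2.isEmpty then acc else (acc.1 ++ [acc.2], [])) else (acc.1, acc.2 ++ [c])

def finishC (r : List (List Char) × List Char) : List (List Char) :=
  if r.2.isEmpty then r.1 else r.1 ++ [r.2]

theorem iso_bound {s : List Char} {i : Nat} (h : isoB s i = true) : 0 < i ∧ i + 1 < s.length := by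
  simp [isoB] at h; tauto

theorem length_partialSub (s : List Char) (k : Nat) : (partialSub s k).length = s.length := by
  simp [partialSub]

theorem getElem?_partialSub (s : List Char) (k i : Nat) :
    (partialSub s k)[i]? = s[i]?.map (fun c => if decide (i < k) && isoB s i then '_' else c) := by
  simp [partialSub, List.getElem?_mapIdx]

theorem partialSub_eq_substAll (s : List Char) (k : Nat) (h : s.length ≤ k + 1) :
    partialSub s k = substAll s := by
  unfold partialSub substAll
  apply List.ext_getElem?
  intro i
  simp only [List.getElem?_mapIdx]
  rcases hi : s[i]? with _ | c
  · rfl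
  · simp only [Option.map_some]
    congr 1
    by_cases hiso : isoB s i = true
    · have := (iso_bound hiso).2
      simp [hiso, Nat.lt_of_succ_lt_succ (Nat.lt_of_lt_of_le this h)]
    · simp [hiso]

theorem collapse_fst (z : List Char) : ∀ (y : List Char) (flag : Bool),
    (z.foldl dealLineCollapseStep (y, flag)).1 = y ++ collapseR z flag := by
  induction z with
  | nil => intro y flag; simp [collapseR]
  | cons c r ih =>
    intro y flag
    by_cases hc : c = ' '
    · cases flag with
      | true => simp [hc, dealLineCollapseStep, collapseR, ih]
      | false => simp [hc, dealLineCollapseStep, collapseR, ih]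
    · cases flag with
      | true => simp [dealLineCollapseStep, collapseR, hc, ih]
      | false => simp [dealLineCollapseStep, collapseR, hc, ih]

theorem go_space (fuel : Nat) : ∀ (l cur : List Char) (acc : List (List Char)),
    l.length < fuel →
    PySem.Chars.splitOn.go [' '] fuel l cur acc = acc.reverse ++ splitSp l cur := by
  induction fuel with
  | zero => intro l cur acc h; omega
  | succ f ih =>
    intro l cur acc h
    cases l with
    | nil =>
      rw [PySem.Chars.splitOn.go]
      all_goals first | omega | simp [splitSp]
    | cons c rest =>
      rw [PySem.Chars.splitOn.go]
      by_cases hc : c = ' '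
      · have hp : List.isPrefixOf [' '] (c :: rest) = true := by simp [hc, List.isPrefixOf]
        simp only [hp, if_true, hc]
        rw [ih _ _ _ (by simpa using Nat.lt_of_succ_lt_succ h)]
        simp [splitSp]
      · have hp : List.isPrefixOf [' '] (c :: rest) = false := by
          simp [List.isPrefixOf]; exact fun h' => (hc h'.symm).elim
        simp only [hp, Bool.false_eq_true, if_false, splitSp, beq_iff_eq, if_neg hc]
        exact ih rest (c :: cur) acc (by simpa using Nat.lt_of_succ_lt_succ h)

theorem stepC_words (v : List Char) : ∀ (toks : List (List Char)) (cur : List Char),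
    finishC (v.foldl stepC (toks, cur)) = toks ++ wordsSp v cur := by
  induction v with
  | nil =>
    intro toks cur
    cases hc : cur.isEmpty
    · simp [finishC, wordsSp, hc]
    · simp [finishC, wordsSp, hc]
  | cons c r ih =>
    intro toks cur
    by_cases hc : c = ' '
    · cases hcur : cur.isEmpty
      · have : stepC (toks, cur) c = (toks ++ [cur], []) := by simp [stepC, hc, hcur]
        rw [List.foldl_cons, this, ih]
        simp [wordsSp, hc, hcur]
      · have : stepC (toks, cur) c = (toks, cur) := by simp [stepC, hc, hcur]
        rw [List.foldl_cons, this, ih]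
        simp [wordsSp, hc, List.isEmpty_iff.1 hcur]
    · have : stepC (toks, cur) c = (toks, cur ++ [c]) := by simp [stepC, hc]
      rw [List.foldl_cons, this, ih]
      simp [wordsSp, hc]

theorem splitSp_collapse (z : List Char) : ∀ (flag : Bool) (cur : List Char),
    (flag = true → cur = []) →
    (splitSp (collapseR z flag) cur).filter (fun w => !w.isEmpty) = wordsSp z cur.reverse := by
  induction z with
  | nil =>
    intro flag cur _
    cases hc : cur.isEmpty
    · simp [collapseR, splitSp, wordsSp, hc, List.isEmpty_iff] at *
    · simp [collapseR, splitSp, wordsSp, List.isEmpty_iff.1 hc]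
  | cons c r ih =>
    intro flag cur hfc
    by_cases hc : c = ' '
    · cases flag with
      | true =>
        have : cur = [] := hfc rfl
        subst this
        simp only [collapseR, hc, if_pos rfl, BEq.rfl, if_true]
        rw [ih true [] (fun _ => rfl)]
        simp [wordsSp]
      | false =>
        simp only [collapseR, hc, BEq.rfl, if_true, Bool.false_eq_true, if_false, splitSp]
        rw [List.filter_cons]
        rw [ih true [] (fun _ => rfl)]
        cases hcur : cur.isEmpty
        · simp [wordsSp, hcur, List.isEmpty_iff] at *
        · simp [List.isEmpty_iff.1 hcur, wordsSp]
    · have hcol : collapseR (c :: r) flag = c :: collapseR r false := by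
        simp [collapseR, hc]
      rw [hcol]
      simp only [splitSp, beq_iff_eq, if_neg hc]
      rw [ih false (c :: cur) (by simp)]
      simp [wordsSp, hc]

theorem eraseIdx_append_cons (pre t : List (List Char)) (w : List Char) :
    (pre ++ w :: t).eraseIdx pre.length = pre ++ t := by
  induction pre with
  | nil => simp
  | cons p ps ih => simp [ih]

theorem popStep_at (pre t : List (List Char)) (w : List Char) :
    dealLinePopStep (pre ++ w :: t) (pre.length : Int)
      = pre ++ (if w.isEmpty then t else w :: t) := by
  have hlen : pre.length < (pre ++ w :: t).length := by simp
  have hget : (pre ++ w :: t)[pre.length]? = some w := by simp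
  unfold dealLinePopStep
  rw [PySem.List.pyGetD_natCast, PySem.List.pop?_natCast _ _ hlen]
  have hw : (pre ++ w :: t)[pre.length] = w := by
    have := List.getElem?_eq_getElem hlen
    rw [hget] at this
    exact (Option.some_inj.mp this).symm
  rw [eraseIdx_append_cons]
  have hD : (pre ++ w :: t).getD pre.length [] = w := by
    simp [List.getD, hget]
  rw [hD, hw]
  cases hwe : w.isEmpty
  · simp [List.isEmpty_iff, List.length_eq_zero_iff] at *
    simp [hwe]
  · simp [List.isEmpty_iff.1 hwe]

theorem popLoop (pre : List (List Char)) : ∀ (t : List (List Char)),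
    (PySem.List.pyRange ((pre.length : Int) - 1) (-1) (-1)).foldl dealLinePopStep (pre ++ t)
      = pre.filter (fun w => !w.isEmpty) ++ t := by
  induction pre using List.reverseRecOn with
  | nil =>
    intro t
    rw [PySem.List.pyRange_neg_one_eq_nil (by simp)]
    simp
  | append_singleton ps w ih =>
    intro t
    have h1 : ((ps ++ [w]).length : Int) - 1 = (ps.length : Int) := by simp
    rw [h1, PySem.List.pyRange_neg_one_cons (by omega), List.foldl_cons]
    have h2 : ps ++ [w] ++ t = ps ++ w :: t := by simp
    rw [h2, popStep_at]
    cases hwe : w.isEmpty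
    · rw [show (if false = true then t else w :: t) = w :: t from rfl, ih (w :: t)]
      simp [List.filter_append, hwe]
    · rw [show (if true = true then t else w :: t) = t from rfl, ih t]
      simp [List.filter_append, hwe]

theorem partialSub_succ_of_not_iso (s : List Char) (k : Nat) (h : isoB s k = false) :
    partialSub s (k + 1) = partialSub s k := by
  apply List.ext_getElem?
  intro i
  simp only [getElem?_partialSub]
  rcases hi : s[i]? with _ | c
  · rfl
  · simp only [Option.map_some]
    congr 1
    by_cases hik : i = k
    · subst hik; simp [h]
    · by_cases hik2 : i < k
      · simp [hik2, Nat.lt_succ_of_lt hik2]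
      · have : ¬ i < k + 1 := by omega
        simp [hik2, this]

theorem subStep_partial (s : List Char) (k : Nat) (hk : 1 ≤ k) (hk2 : k + 1 < s.length) :
    dealLineSubStep (partialSub s k) (k : Int) = partialSub s (k + 1) := by
  have hklen : k < s.length := by omega
  have hlen : (partialSub s k).length = s.length := length_partialSub s k
  have hgk : (partialSub s k)[k]? = s[k]? := by
    simp [getElem?_partialSub]
  have cast1 : (k : Int) - 1 = ((k - 1 : Nat) : Int) := by omega
  have cast2 : (k : Int) + 1 = ((k + 1 : Nat) : Int) := by omega
  have hsk : s[k]? = some s[k] := List.getElem?_eq_getElem hklen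
  have hgk1 : (partialSub s k)[k+1]? = s[k+1]? := by
    simp only [getElem?_partialSub]
    have : ¬ k + 1 < k := by omega
    rcases s[k+1]? with _ | c <;> simp [this]
  by_cases hsp : s[k] = ' '
  · have hiso1 : isoB s (k - 1) = false := by
      have : (k - 1) + 1 = k := by omega
      simp [isoB, this, hsk, hsp]
    have hgkm : (partialSub s (k))[k-1]? = s[k-1]? := by
      simp only [getElem?_partialSub]
      rcases s[k-1]? with _ | c <;> simp [hiso1]
    have hcond : ((PySem.List.pyGet? (partialSub s k) ((k : Int)) == some ' ')
        && (PySem.List.pyGet? (partialSub s k) ((k : Int) - 1) != some ' ')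
        && (PySem.List.pyGet? (partialSub s k) ((k : Int) + 1) != some ' ')) = isoB s k := by
      rw [cast1, cast2]
      simp only [PySem.List.pyGet?_natCast, hgk, hgkm, hgk1, isoB, hsk, hsp]
      have h0 : decide (0 < k) = true := by simp; omega
      have h1 : decide (k + 1 < s.length) = true := by simp [hk2]
      simp [h0, h1, Bool.and_comm, Bool.and_assoc, Bool.and_left_comm]
    unfold dealLineSubStep
    rw [hcond]
    cases hisok : isoB s k
    · simp only [Bool.false_eq_true, if_false]
      exact (partialSub_succ_of_not_iso s k hisok).symm
    · simp only [if_true]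
      rw [PySem.List.slice_to_natCast, cast2, PySem.List.slice_from_natCast]
      rw [← List.set_eq_take_cons_drop '_' (by omega : k < (partialSub s k).length)]
      apply List.ext_getElem?
      intro i
      simp only [List.getElem?_set, getElem?_partialSub, hlen]
      by_cases hik : i = k
      · subst hik
        rw [if_pos rfl, if_pos (by omega), hsk]
        simp [hisok]
      · rw [if_neg (Ne.symm hik)]
        rcases s[i]? with _ | c
        · rfl
        · simp only [Option.map_some]
          congr 1
          by_cases hik2 : i < k
          · simp [hik2, Nat.lt_succ_of_lt hik2]
          · have : ¬ i < k + 1 := by omega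
            simp [hik2, this]
  · have hcondf : (PySem.List.pyGet? (partialSub s k) ((k : Int)) == some ' ') = false := by
      rw [PySem.List.pyGet?_natCast, hgk, hsk]
      simp [hsp]
    unfold dealLineSubStep
    rw [hcondf]
    simp only [Bool.false_and, Bool.false_eq_true, if_false]
    have hisok : isoB s k = false := by simp [isoB, hsk, hsp]
    exact (partialSub_succ_of_not_iso s k hisok).symm

theorem subLoopAux (s : List Char) : ∀ (d k : Nat), k + d = s.length → 1 ≤ k →
    (PySem.List.pyRange (k : Int) ((s.length : Int) - 1) 1).foldl dealLineSubStep (partialSub s k)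
      = substAll s := by
  intro d
  induction d with
  | zero =>
    intro k hd hk
    rw [PySem.List.pyRange_one_eq_nil (by omega)]
    exact partialSub_eq_substAll s k (by omega)
  | succ d ih =>
    intro k hd hk
    by_cases h : (k : Int) < (s.length : Int) - 1
    · rw [PySem.List.pyRange_one_cons h, List.foldl_cons]
      rw [subStep_partial s k hk (by omega)]
      have cast2 : (k : Int) + 1 = ((k + 1 : Nat) : Int) := by omega
      rw [cast2]
      exact ih (k + 1) (by omega) (by omega)
    · rw [PySem.List.pyRange_one_eq_nil (by omega)]
      exact partialSub_eq_substAll s k (by omega)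

theorem partialSub_one (s : List Char) : partialSub s 1 = s := by
  apply List.ext_getElem?
  intro i
  simp only [getElem?_partialSub]
  rcases hi : s[i]? with _ | c
  · rfl
  · simp only [Option.map_some]
    congr 1
    by_cases h0 : i = 0
    · subst h0; simp [isoB]
    · simp [show ¬ i < 1 by omega]

theorem subLoop_eq (s : List Char) :
    (PySem.List.pyRange 1 ((s.length : Int) - 1) 1).foldl dealLineSubStep s = substAll s := by
  rcases Nat.eq_zero_or_pos s.length with h0 | hpos
  · have hnil : s = [] := List.eq_nil_of_length_eq_zero h0
    subst hnil
    rw [PySem.List.pyRange_one_eq_nil (by simp)]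
    simp [substAll]
  · have h := subLoopAux s (s.length - 1) 1 (by omega) le_rfl
    rw [partialSub_one s] at h
    simpa using h

theorem getElem?_substAll (s : List Char) (i : Nat) :
    (substAll s)[i]? = s[i]?.map (fun c => if isoB s i then '_' else c) := by
  simp [substAll, List.getElem?_mapIdx]

theorem altStep_eq_stepC (s : List Char) (j : Nat) (c : Char) (hj : s[j]? = some c)
    (acc : List (List Char) × List Char) :
    dealLineAltStep s (s.length : Int) acc ((j : Int), c)
      = stepC acc (if isoB s j then '_' else c) := by
  by_cases hc : c = ' '
  · subst hc
    by_cases hj0 : j = 0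
    · subst hj0
      have hiso : isoB s 0 = false := by simp [isoB]
      simp only [hiso, Bool.false_eq_true, if_false]
      cases hcur : acc.2.isEmpty <;> simp [dealLineAltStep, stepC, hcur]
    · have cast1 : (j : Int) - 1 = ((j - 1 : Nat) : Int) := by omega
      have cast2 : (j : Int) + 1 = ((j + 1 : Nat) : Int) := by omega
      have hcond : ((decide (0 < (j : Int)) && decide ((j : Int) < (s.length : Int) - 1))
          && (PySem.List.pyGet? s ((j : Int) - 1) != some ' ')
          && (PySem.List.pyGet? s ((j : Int) + 1) != some ' ')) = isoB s j := by
        rw [cast1, cast2]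
        simp only [PySem.List.pyGet?_natCast, isoB, hj]
        have e0 : decide (0 < (j : Int)) = decide (0 < j) := by
          rcases Nat.eq_zero_or_pos j with h | h <;> simp [h] <;> omega
        have e1 : decide ((j : Int) < (s.length : Int) - 1) = decide (j + 1 < s.length) := by
          by_cases h : j + 1 < s.length <;> simp [h] <;> omega
        rw [e0, e1]
        simp [Bool.and_comm, Bool.and_left_comm, Bool.and_assoc]
      unfold dealLineAltStep
      simp only [BEq.rfl, if_true, hcond]
      cases hiso : isoB s j
      · simp only [Bool.false_eq_true, if_false, stepC, BEq.rfl, if_true]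
        cases hcur : acc.2.isEmpty <;> simp [hcur]
      · simp [stepC]
  · have hiso : isoB s j = false := by simp [isoB, hj, hc]
    simp [dealLineAltStep, stepC, hiso, hc]

theorem altFold_eq_stepC (s : List Char) : ∀ (u : List Char) (j : Nat),
    u = s.drop j → ∀ (acc : List (List Char) × List Char),
    (PySem.List.enumerate u (j : Int)).foldl (dealLineAltStep s (s.length : Int)) acc
      = ((substAll s).drop j).foldl stepC acc := by
  intro u
  induction u with
  | nil =>
    intro j h acc
    have hlj : s.length ≤ j := by
      have := congrArg List.length h
      simp at this
      omega
    have : (substAll s).drop j = [] := by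
      rw [List.drop_eq_nil_iff]
      simpa [substAll] using hlj
    rw [this]
    simp [PySem.List.enumerate]
  | cons c r ih =>
    intro j h acc
    have hj : s[j]? = some c := by
      have : (s.drop j)[0]? = some c := by rw [← h]; rfl
      simpa [List.getElem?_drop] using this
    have hjlen : j < s.length := by
      by_contra hc
      push_neg at hc
      rw [List.getElem?_eq_none (by omega)] at hj
      cases hj
    have hr : r = s.drop (j + 1) := by
      have ht : (s.drop j).tail = s.drop (j + 1) := List.tail_drop
      rw [← ht, ← h]
      rfl
    have hslen : j < (substAll s).length := by
      simpa [substAll] using hjlen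
    rw [PySem.List.enumerate_cons, List.foldl_cons,
        List.drop_eq_getElem_cons hslen, List.foldl_cons]
    have hsubj : (substAll s)[j]'hslen = if isoB s j then '_' else c := by
      have h1 : (substAll s)[j]? = some (if isoB s j then '_' else c) := by
        rw [getElem?_substAll, hj]; rfl
      have h2 := List.getElem?_eq_getElem hslen
      rw [h1] at h2
      exact (Option.some_inj.mp h2).symm
    rw [hsubj, altStep_eq_stepC s j c hj acc]
    have cast2 : (j : Int) + 1 = ((j + 1 : Nat) : Int) := by omega
    rw [cast2]
    exact ih (j + 1) hr _

theorem splitOn_space (y : List Char) : PySem.Chars.splitOn y [' '] = splitSp y [] := by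
  unfold PySem.Chars.splitOn
  rw [go_space (y.length + 1) y [] [] (by omega)]
  rfl

theorem dealLine_eq_words (T : String) :
    dealLine T = (wordsSp (substAll T.toList) []).map String.ofList := by
  unfold dealLine
  simp only [PySem.List.len_eq]
  rw [subLoop_eq, collapse_fst, List.nil_append, splitOn_space]
  have hp := popLoop (splitSp (collapseR (substAll T.toList) false) []) []
  rw [List.append_nil, List.append_nil] at hp
  rw [hp, splitSp_collapse _ false [] (by intro h; cases h)]
  rfl

theorem dealLine_alt_eq_words (T : String) :
    dealLine_alt T = (wordsSp (substAll T.toList) []).map String.ofList := by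
  unfold dealLine_alt
  simp only [PySem.List.len_eq]
  have h0 : (0 : Int) = ((0 : Nat) : Int) := rfl
  rw [h0, altFold_eq_stepC T.toList T.toList 0 (by simp) ([], [])]
  rw [List.drop_zero]
  have := stepC_words (substAll T.toList) [] []
  simp only [finishC] at this
  rw [List.nil_append] at this
  rw [← this]
  cases h : ((substAll T.toList).foldl stepC ([], [])).2.isEmpty <;> simp


-- ===== VERDICT (by name: the statement is the Claim_ definition above) =====
theorem dealLine_spec : Claim_equal_dealLine := by
  intro T _
  unfold Spec_dealLine
  rw [dealLine_eq_words, dealLine_alt_eq_words]
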